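-- pv_equiv track=rewrite | github.com/surajskrv/Morphly | backend/app/services/profile_service.py | infer_education
-- ===== SOURCE A (Python) =====
-- EDUCATION_KEYWORDS = ("b.tech", "b.e", "bsc", "bachelor", "m.tech", "msc", "master", "mba")
--
-- def normalize_list(values: list[str]) -> list[str]:
--     seen: set[str] = set()
--     normalized: list[str] = []
--     for value in values:
--         cleaned = " ".join(str(value).strip().split())
--         if not cleaned:
--             continue
--         key = cleaned.lower()
--         if key in seen:
--             continue
--         seen.add(key)
--         normalized.append(cleaned)
--     return normalized
--
-- def infer_education(text: str) -> list[str]: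
--     education: list[str] = []
--     for line in text.splitlines():
--         cleaned = " ".join(line.strip().split())
--         lowered = cleaned.lower()
--         if any(keyword in lowered for keyword in EDUCATION_KEYWORDS):
--             education.append(cleaned)
--     return normalize_list(education)[:4]
-- ===== SOURCE B (Python) =====
-- EDUCATION_KEYWORDS = ("b.tech", "b.e", "bsc", "bachelor", "m.tech", "msc", "master", "mba")
--
-- def infer_education(text: str) -> list[str]:
--     # One early-terminating pass: clean, keyword-filter, case-insensitive dedup
--     # and the cap of 4 are fused into a single loop with a `seen` set.
--     results: list[str] = []
--     seen: set[str] = set()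
--     for line in text.splitlines():
--         cleaned = " ".join(line.strip().split())
--         if not cleaned:
--             continue
--         lowered = cleaned.lower()
--         if any(k in lowered for k in EDUCATION_KEYWORDS) and lowered not in seen:
--             seen.add(lowered)
--             results.append(cleaned)
--             if len(results) == 4:
--                 break
--     return results
-- ===== Notes on version B (the rewrite author's own statement) =====
-- stated objective: simpler
-- what changed: Fuses A's collect pass, normalize_list dedup pass and final [:4] slice into one early-terminating loop over the lines with a seen set, dropping normalize_list entirely.
import Mathlib
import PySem

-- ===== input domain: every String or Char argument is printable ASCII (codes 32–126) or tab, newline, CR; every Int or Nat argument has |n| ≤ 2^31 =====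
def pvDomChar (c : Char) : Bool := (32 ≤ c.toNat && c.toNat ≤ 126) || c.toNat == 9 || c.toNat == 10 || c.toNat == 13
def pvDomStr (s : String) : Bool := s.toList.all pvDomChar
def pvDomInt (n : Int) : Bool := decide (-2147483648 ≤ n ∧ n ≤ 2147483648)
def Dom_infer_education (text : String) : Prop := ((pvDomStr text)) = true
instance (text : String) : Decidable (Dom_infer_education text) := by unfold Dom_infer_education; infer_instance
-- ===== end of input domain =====

-- B fuses A's collect pass, normalize_list dedup pass and [:4] slice into one
-- early-terminating loop (objective: simpler).

def EDUCATION_KEYWORDS : List String :=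
  ["b.tech", "b.e", "bsc", "bachelor", "m.tech", "msc", "master", "mba"]

-- ' '.join(x.strip().split()) — this cleaning step appears verbatim in both Pythons
def pyClean (s : String) : String :=
  PySem.Str.join " " (PySem.Str.split₀ (PySem.Str.strip s))

-- any(keyword in lowered for keyword in EDUCATION_KEYWORDS)
def kwMatch (lowered : String) : Bool :=
  EDUCATION_KEYWORDS.any (fun k => PySem.Str.isIn k lowered)

-- ===== PORT A =====
def normalize_list_go : List String → PySem.Set String → List String → List String
  | [], _, normalized => normalized
  | v :: vs, seen, normalized =>
    let cleaned := pyClean v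
    if cleaned = "" then normalize_list_go vs seen normalized
    else
      let key := PySem.Str.lower cleaned
      if seen.contains key then normalize_list_go vs seen normalized
      else normalize_list_go vs (seen.add key) (normalized ++ [cleaned])

def normalize_list (values : List String) : List String :=
  normalize_list_go values PySem.Set.empty []

def infer_education (text : String) : List String :=
  let education := (PySem.Str.splitlines text).foldl (fun acc line =>
    let cleaned := pyClean line
    let lowered := PySem.Str.lower cleaned
    if kwMatch lowered then acc ++ [cleaned] else acc) []
  (normalize_list education).take 4

-- ===== PORT B =====
def infer_education_alt_go : List String → PySem.Set String → List String → List String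
  | [], _, results => results
  | line :: ls, seen, results =>
    let cleaned := pyClean line
    if cleaned = "" then infer_education_alt_go ls seen results
    else
      let lowered := PySem.Str.lower cleaned
      if kwMatch lowered && !(seen.contains lowered) then
        let results' := results ++ [cleaned]
        if results'.length = 4 then results'
        else infer_education_alt_go ls (seen.add lowered) results'
      else infer_education_alt_go ls seen results

def infer_education_alt (text : String) : List String :=
  infer_education_alt_go (PySem.Str.splitlines text) PySem.Set.empty []

-- ===== PRECONDITION & SPEC =====
def Spec_infer_education (text : String) (out : List String) : Prop := out = infer_education_alt text
instance (text : String) (out : List String) : Decidable (Spec_infer_education text out) := by unfold Spec_infer_education; infer_instance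

-- ===== CLAIM (what is proved, stated in full; the proofs are below) =====
def Claim_equal_infer_education : Prop := ∀ (text : String), Dom_infer_education text → Spec_infer_education text (infer_education text)

-- ===== LEMMAS AND PROOFS =====

-- a "good" word list: every word nonempty and whitespace-free (what split() produces)
def GoodWords (ws : List (List Char)) : Prop :=
  ∀ w ∈ ws, w ≠ [] ∧ ∀ c ∈ w, PySem.Chars.isspace c = false

theorem split₀_go_good (l : List Char) : ∀ (cur : List Char) (acc : List (List Char)),
    (∀ c ∈ cur, PySem.Chars.isspace c = false) → GoodWords acc →
    GoodWords (PySem.Chars.split₀.go l cur acc) := by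
  induction l with
  | nil =>
    intro cur acc hcur hacc
    show GoodWords (if cur.isEmpty then acc.reverse else (cur.reverse :: acc).reverse)
    split
    · intro w hw; exact hacc w (List.mem_reverse.mp hw)
    · rename_i hne
      intro w hw
      rcases List.mem_cons.mp (List.mem_reverse.mp hw) with h | h
      · subst h
        constructor
        · simpa [List.isEmpty_iff] using hne
        · intro c hc; exact hcur c (List.mem_reverse.mp hc)
      · exact hacc w h
  | cons c rest ih =>
    intro cur acc hcur hacc
    show GoodWords (if PySem.Chars.isspace c then
        (if cur.isEmpty then PySem.Chars.split₀.go rest [] acc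
         else PySem.Chars.split₀.go rest [] (cur.reverse :: acc))
      else PySem.Chars.split₀.go rest (c :: cur) acc)
    split
    · rename_i hsp
      split
      · exact ih [] acc (by simp) hacc
      · rename_i hne
        refine ih [] (cur.reverse :: acc) (by simp) ?_
        intro w hw
        rcases List.mem_cons.mp hw with h | h
        · subst h
          exact ⟨by simpa [List.isEmpty_iff] using hne,
                 fun d hd => hcur d (List.mem_reverse.mp hd)⟩
        · exact hacc w h
    · rename_i hsp
      refine ih (c :: cur) acc ?_ hacc
      intro d hd
      rcases List.mem_cons.mp hd with h | h
      · subst h; simpa using hsp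
      · exact hcur d h

theorem split₀_good (l : List Char) : GoodWords (PySem.Chars.split₀ l) :=
  split₀_go_good l [] [] (by simp) (by intro w hw; simp at hw)

theorem split₀_go_word (w : List Char) : ∀ (rest cur : List Char) (acc : List (List Char)),
    (∀ c ∈ w, PySem.Chars.isspace c = false) →
    PySem.Chars.split₀.go (w ++ rest) cur acc = PySem.Chars.split₀.go rest (w.reverse ++ cur) acc := by
  induction w with
  | nil => intro rest cur acc _; simp
  | cons c t ih =>
    intro rest cur acc h
    have hc : PySem.Chars.isspace c = false := h c (by simp)
    show (if PySem.Chars.isspace c then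
        (if cur.isEmpty then PySem.Chars.split₀.go (t ++ rest) [] acc
         else PySem.Chars.split₀.go (t ++ rest) [] (cur.reverse :: acc))
      else PySem.Chars.split₀.go (t ++ rest) (c :: cur) acc) = _
    rw [if_neg (by simp [hc])]
    rw [ih rest (c :: cur) acc (fun d hd => h d (by simp [hd]))]
    simp

theorem split₀_go_acc (l : List Char) : ∀ (cur : List Char) (acc : List (List Char)),
    PySem.Chars.split₀.go l cur acc = acc.reverse ++ PySem.Chars.split₀.go l cur [] := by
  induction l with
  | nil =>
    intro cur acc
    show (if cur.isEmpty then acc.reverse else (cur.reverse :: acc).reverse) =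
      acc.reverse ++ (if cur.isEmpty then ([] : List (List Char)).reverse else (cur.reverse :: ([] : List (List Char))).reverse)
    split <;> simp
  | cons c rest ih =>
    intro cur acc
    show (if PySem.Chars.isspace c then
        (if cur.isEmpty then PySem.Chars.split₀.go rest [] acc
         else PySem.Chars.split₀.go rest [] (cur.reverse :: acc))
      else PySem.Chars.split₀.go rest (c :: cur) acc) = acc.reverse ++ _
    by_cases hsp : PySem.Chars.isspace c = true
    · rw [if_pos hsp]
      by_cases he : cur.isEmpty = true
      · rw [if_pos he]
        conv_rhs => rw [show PySem.Chars.split₀.go (c :: rest) cur [] =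
          (if PySem.Chars.isspace c then
            (if cur.isEmpty then PySem.Chars.split₀.go rest [] []
             else PySem.Chars.split₀.go rest [] [cur.reverse])
          else PySem.Chars.split₀.go rest (c :: cur) []) from rfl]
        rw [if_pos hsp, if_pos he, ih [] acc]
      · rw [if_neg he]
        conv_rhs => rw [show PySem.Chars.split₀.go (c :: rest) cur [] =
          (if PySem.Chars.isspace c then
            (if cur.isEmpty then PySem.Chars.split₀.go rest [] []
             else PySem.Chars.split₀.go rest [] [cur.reverse])
          else PySem.Chars.split₀.go rest (c :: cur) []) from rfl]
        rw [if_pos hsp, if_neg he, ih [] (cur.reverse :: acc), ih [] [cur.reverse]]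
        simp
    · rw [if_neg hsp]
      conv_rhs => rw [show PySem.Chars.split₀.go (c :: rest) cur [] =
        (if PySem.Chars.isspace c then
          (if cur.isEmpty then PySem.Chars.split₀.go rest [] []
           else PySem.Chars.split₀.go rest [] [cur.reverse])
        else PySem.Chars.split₀.go rest (c :: cur) []) from rfl]
      rw [if_neg hsp, ih (c :: cur) acc]

theorem split₀_intercalate (ws : List (List Char)) (h : GoodWords ws) :
    PySem.Chars.split₀ (List.intercalate [' '] ws) = ws := by
  induction ws with
  | nil => rfl
  | cons w t ih =>
    have hw := h w (by simp)
    have ht : GoodWords t := fun v hv => h v (by simp [hv])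
    cases t with
    | nil =>
      show PySem.Chars.split₀.go (List.intercalate [' '] [w]) [] [] = [w]
      have : List.intercalate [' '] [w] = w := by simp [List.intercalate]
      rw [this, show w = w ++ [] by simp, split₀_go_word w [] [] [] hw.2]
      show (if (w.reverse ++ []).isEmpty then ([] : List (List Char)).reverse
        else ((w.reverse ++ []).reverse :: ([] : List (List Char))).reverse) = [w ++ []]
      rw [if_neg (by simp [List.isEmpty_iff, hw.1])]
      simp
    | cons w' t' =>
      have hint : List.intercalate [' '] (w :: w' :: t') = w ++ ' ' :: List.intercalate [' '] (w' :: t') := by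
        simp [List.intercalate, List.intersperse]
      show PySem.Chars.split₀.go _ [] [] = _
      rw [hint, split₀_go_word w _ [] [] hw.2]
      show (if PySem.Chars.isspace ' ' then
          (if (w.reverse ++ []).isEmpty then PySem.Chars.split₀.go (List.intercalate [' '] (w' :: t')) [] []
           else PySem.Chars.split₀.go (List.intercalate [' '] (w' :: t')) [] [(w.reverse ++ []).reverse])
        else _) = _
      rw [if_pos (by decide), if_neg (by simp [List.isEmpty_iff, hw.1])]
      rw [split₀_go_acc]
      have := ih ht
      show _ ++ PySem.Chars.split₀ (List.intercalate [' '] (w' :: t')) = _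
      rw [this]
      simp

theorem lstrip_eq_self (l : List Char) (h : ∀ c, l.head? = some c → PySem.Chars.isspace c = false) :
    PySem.Chars.lstrip l = l := by
  cases l with
  | nil => rfl
  | cons c t =>
    show List.dropWhile PySem.Chars.isspace (c :: t) = c :: t
    rw [List.dropWhile_cons, if_neg (by simp [h c rfl])]

theorem rstrip_eq_self (l : List Char) (h : ∀ c, l.getLast? = some c → PySem.Chars.isspace c = false) :
    PySem.Chars.rstrip l = l := by
  show (List.dropWhile PySem.Chars.isspace l.reverse).reverse = l
  rw [show List.dropWhile PySem.Chars.isspace l.reverse = l.reverse from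
    lstrip_eq_self l.reverse (by intro c hc; exact h c (by rwa [List.head?_reverse] at hc)),
    List.reverse_reverse]

theorem intercalate_head (ws : List (List Char)) (h : GoodWords ws) (c : Char)
    (hc : (List.intercalate [' '] ws).head? = some c) : PySem.Chars.isspace c = false := by
  cases ws with
  | nil => simp [List.intercalate] at hc
  | cons w t =>
    have hw := h w (by simp)
    have hhead : (List.intercalate [' '] (w :: t)).head? = w.head? := by
      cases t with
      | nil => simp [List.intercalate]
      | cons w' t' =>
        rw [show List.intercalate [' '] (w :: w' :: t') = w ++ ' ' :: List.intercalate [' '] (w' :: t') by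
          simp [List.intercalate, List.intersperse]]
        rw [List.head?_append_of_ne_nil _ hw.1]
    rw [hhead] at hc
    exact hw.2 c (List.mem_of_mem_head? hc)

theorem intercalate_getLast (ws : List (List Char)) (h : GoodWords ws) (c : Char)
    (hc : (List.intercalate [' '] ws).getLast? = some c) : PySem.Chars.isspace c = false := by
  induction ws with
  | nil => simp [List.intercalate] at hc
  | cons w t ih =>
    have hw := h w (by simp)
    have ht : GoodWords t := fun v hv => h v (by simp [hv])
    cases t with
    | nil =>
      rw [show List.intercalate [' '] [w] = w by simp [List.intercalate]] at hc
      exact hw.2 c (List.mem_of_mem_getLast? hc)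
    | cons w' t' =>
      rw [show List.intercalate [' '] (w :: w' :: t') = w ++ ' ' :: List.intercalate [' '] (w' :: t') by
        simp [List.intercalate, List.intersperse]] at hc
      have hne : List.intercalate [' '] (w' :: t') ≠ [] := by
        cases t' with
        | nil =>
          rw [show List.intercalate [' '] [w'] = w' by simp [List.intercalate]]
          exact (h w' (by simp)).1
        | cons w'' t'' =>
          rw [show List.intercalate [' '] (w' :: w'' :: t'') = w' ++ ' ' :: List.intercalate [' '] (w'' :: t'') by
            simp [List.intercalate, List.intersperse]]
          simp
      obtain ⟨d, hd⟩ : ∃ d, (List.intercalate [' '] (w' :: t')).getLast? = some d := by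
        cases hx : (List.intercalate [' '] (w' :: t')).getLast? with
        | none => exact absurd (List.getLast?_eq_none_iff.mp hx) hne
        | some d => exact ⟨d, rfl⟩
      rw [List.getLast?_append_of_ne_nil _ (by simp), List.getLast?_cons, hd] at hc
      simp at hc
      subst hc
      exact ih ht hd

theorem strip_intercalate (ws : List (List Char)) (h : GoodWords ws) :
    PySem.Chars.strip (List.intercalate [' '] ws) = List.intercalate [' '] ws := by
  show PySem.Chars.rstrip (PySem.Chars.lstrip _) = _
  rw [lstrip_eq_self _ (intercalate_head ws h), rstrip_eq_self _ (intercalate_getLast ws h)]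

theorem pyClean_toList (s : String) :
    (pyClean s).toList = List.intercalate [' '] (PySem.Chars.split₀ (PySem.Chars.strip s.toList)) := by
  simp [pyClean, PySem.Str.toList_join, PySem.Chars.join, PySem.Str.split₀_map_toList,
    PySem.Str.toList_strip]

theorem pyClean_idem (s : String) : pyClean (pyClean s) = pyClean s := by
  have h1 : (pyClean (pyClean s)).toList = (pyClean s).toList := by
    rw [pyClean_toList (pyClean s), pyClean_toList s]
    rw [strip_intercalate _ (split₀_good _), split₀_intercalate _ (split₀_good _)]
  rw [← String.ofList_toList (s := pyClean (pyClean s)), h1, String.ofList_toList]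

theorem pyClean_of_kwMatch {s : String} (h : kwMatch (PySem.Str.lower (pyClean s)) = true) :
    pyClean s ≠ "" := by
  intro he
  rw [he] at h
  revert h
  decide

theorem normalize_go_acc (vs : List String) : ∀ (seen : PySem.Set String) (n : List String),
    normalize_list_go vs seen n = n ++ normalize_list_go vs seen [] := by
  induction vs with
  | nil => intro seen n; simp [normalize_list_go]
  | cons v vs ih =>
    intro seen n
    simp only [normalize_list_go]
    split
    · exact ih seen n
    · split
      · exact ih seen n
      · rw [ih _ (n ++ [pyClean v]), ih _ ([] ++ [pyClean v])]
        simp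

-- the fused loop equals "dedup the filtered cleaned list, then take 4"
theorem fused_eq (ls : List String) : ∀ (seen : PySem.Set String) (res : List String),
    res.length < 4 →
    infer_education_alt_go ls seen res =
      (res ++ normalize_list_go ((ls.filter (fun l => kwMatch (PySem.Str.lower (pyClean l)))).map pyClean) seen []).take 4 := by
  induction ls with
  | nil =>
    intro seen res h
    simp only [infer_education_alt_go, List.filter_nil, List.map_nil, normalize_list_go,
      List.append_nil]
    exact (List.take_of_length_le (Nat.le_of_lt h)).symm
  | cons l ls ih =>
    intro seen res h
    rw [List.filter_cons]
    by_cases hkw : kwMatch (PySem.Str.lower (pyClean l)) = true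
    · have hne : pyClean l ≠ "" := pyClean_of_kwMatch hkw
      have hidem : pyClean (pyClean l) = pyClean l := pyClean_idem l
      rw [if_pos (by simpa using hkw)]
      simp only [infer_education_alt_go, List.map_cons, normalize_list_go]
      rw [hidem, if_neg hne, if_neg hne, hkw]
      by_cases hc : seen.contains (PySem.Str.lower (pyClean l)) = true
      · simp only [hc, if_true, Bool.not_true, Bool.and_false,
          Bool.false_eq_true, if_false]
        exact ih seen res h
      · simp only [Bool.eq_false_iff.mpr hc, Bool.not_false, Bool.and_true,
          if_true, Bool.false_eq_true, if_false]
        rw [normalize_go_acc]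
        by_cases h4 : (res ++ [pyClean l]).length = 4
        · rw [if_pos h4, show res ++ (([] ++ [pyClean l]) ++ normalize_list_go
            (List.map pyClean (List.filter (fun l => kwMatch (PySem.Str.lower (pyClean l))) ls))
            (seen.add (PySem.Str.lower (pyClean l))) []) = (res ++ [pyClean l]) ++ normalize_list_go
            (List.map pyClean (List.filter (fun l => kwMatch (PySem.Str.lower (pyClean l))) ls))
            (seen.add (PySem.Str.lower (pyClean l))) [] by simp, List.take_left' h4]
        · rw [if_neg h4, ih (seen.add (PySem.Str.lower (pyClean l))) (res ++ [pyClean l])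
            (by simp at h4 ⊢; omega)]
          simp
    · rw [if_neg (by simpa using hkw)]
      simp only [infer_education_alt_go]
      by_cases hne : pyClean l = ""
      · rw [if_pos hne]
        exact ih seen res h
      · rw [if_neg hne, Bool.eq_false_iff.mpr hkw]
        simp only [Bool.false_and, Bool.false_eq_true, if_false]
        exact ih seen res h

theorem ports_agree (text : String) : infer_education text = infer_education_alt text := by
  unfold infer_education infer_education_alt
  rw [show (fun (acc : List String) (line : String) =>
      let cleaned := pyClean line
      let lowered := PySem.Str.lower cleaned
      if kwMatch lowered then acc ++ [cleaned] else acc) =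
    (fun acc line => if (fun l => kwMatch (PySem.Str.lower (pyClean l))) line = true
      then acc ++ [pyClean line] else acc) from rfl]
  rw [PySem.List.foldl_append_if (fun l => kwMatch (PySem.Str.lower (pyClean l))) pyClean _ []]
  unfold normalize_list
  rw [fused_eq (PySem.Str.splitlines text) PySem.Set.empty [] (by simp)]
  simp

-- ===== VERDICT (by name: the statement is the Claim_ definition above) =====
theorem infer_education_spec : Claim_equal_infer_education := by
  intro text _
  unfold Spec_infer_education
  exact ports_agree text
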